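-- pv_equiv track=rewrite | github.com/Butskov/Bioinformatics-Algorithms | week5-6/14 - Contig Generation Problem.py | generate_contigs_from_reads
-- ===== SOURCE A (Python) =====
-- def generate_contigs_from_reads(kmers):
--     graph = debrujin_graph_from_kmers(kmers)
--     degrees = graph_degrees(graph)
--     contigs = []
--
--     for v in graph.keys():
--         if degrees[v] == [1, 1]:
--             continue
--         for u in graph[v]:
--             contig = v
--             w = u
--             while True:
--                 contig += w[-1]
--                 w_degree = degrees[w]
--                 if w_degree == [1, 1]:
--                     w = graph[w][0]
--                 else:
--                     break
--             contigs.append(contig)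
--     return sorted(contigs)
--
-- def debrujin_graph_from_kmers(patterns):
--     kmers = []
--     for pattern in patterns:
--         kmers = kmers+suffix_composition(len(pattern), pattern, uniq=True)
--     kmers = set(kmers)
--     dict = {}
--     for kmer1 in kmers:
--         dict[kmer1] = []
--     for kmer in patterns:
--         dict[prefix(kmer)].append(suffix(kmer))
--     return dict
--
-- def graph_degrees(graph):
--     degrees = {}
--     for i in graph.keys():
--         neighbors = graph[i]
--         out_degree = len(neighbors)
--
--         if i in degrees:
--             degrees[i][1] = out_degree
--         else:
--             degrees[i] = [0, out_degree]
--
--         for j in neighbors: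
--             if j in degrees:
--                 degrees[j][0] += 1
--             else:
--                 degrees[j] = [1, 0]
--
--     return degrees
--
-- def suffix(string):
--     return string[1:]
--
-- def prefix(string):
--     return string[0:-1]
--
-- def suffix_composition(k, text, uniq=False):
--     kmers = []
--     for i in range(len(text)+1-k):
--         kmers.append(text[i:i+k-1])
--     if uniq:
--         return sorted(list(kmers))
--     else:
--         return sorted(kmers)
-- ===== SOURCE B (Python) =====
-- def generate_contigs_from_reads(kmers):
--     # Edge-gluing algorithm: each kmer is an edge of the de Bruijn graph; at every
--     # 1-in/1-out node glue its unique incoming edge to its unique outgoing edge,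
--     # giving a successor map on edge indices. A contig is then emitted for every
--     # edge that is not glued onto a predecessor, by following the precomputed
--     # pointers (no node walk, no degree table consulted during traversal).
--     pres = [k[:-1] for k in kmers]
--     sufs = [k[1:] for k in kmers]
--     outs = {}
--     ins = {}
--     for e in range(len(kmers)):
--         outs.setdefault(pres[e], []).append(e)
--         ins.setdefault(sufs[e], []).append(e)
--     nxt = {}
--     for v, inc in ins.items():
--         if len(inc) == 1 and len(outs.get(v, ())) == 1:
--             nxt[inc[0]] = outs[v][0]
--     glued = set(nxt.values())
--     contigs = []
--     for e in range(len(kmers)):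
--         if e in glued:
--             continue
--         chars = [pres[e], sufs[e][-1]]
--         while e in nxt:
--             e = nxt[e]
--             chars.append(sufs[e][-1])
--         contigs.append(''.join(chars))
--     return sorted(contigs)
-- ===== Notes on version B (the rewrite author's own statement) =====
-- stated objective: faster
-- what changed: B uses an edge-gluing algorithm instead of A's node walk: each kmer is an edge, a successor map on edge indices is precomputed by gluing the unique in-edge to the unique out-edge at every 1-in/1-out node, and one contig is emitted per edge that is not in the successor map's image by following the pointers - there is no node adjacency walk, no degree table consulted during traversal, and none of A's quadratic list concatenation or string +=.
import Mathlib
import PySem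

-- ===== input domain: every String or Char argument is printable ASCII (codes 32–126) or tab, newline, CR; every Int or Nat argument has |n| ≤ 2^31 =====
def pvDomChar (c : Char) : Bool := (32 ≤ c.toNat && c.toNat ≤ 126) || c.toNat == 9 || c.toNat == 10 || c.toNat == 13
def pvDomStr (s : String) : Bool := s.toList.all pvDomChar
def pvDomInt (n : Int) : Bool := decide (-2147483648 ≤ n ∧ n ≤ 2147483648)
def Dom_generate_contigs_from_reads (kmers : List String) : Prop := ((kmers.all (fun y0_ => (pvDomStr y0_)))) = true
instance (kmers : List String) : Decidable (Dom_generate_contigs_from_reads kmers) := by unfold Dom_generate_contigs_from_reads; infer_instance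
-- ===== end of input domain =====

-- B replaces A's node-graph walk (pre-seeded adjacency dict built by quadratic list
-- concatenation, [in,out] degree table consulted at every step) by an edge-gluing
-- algorithm: a successor map on edge indices is precomputed once by gluing the unique
-- in-edge to the unique out-edge of every 1-in/1-out node, and one contig is emitted
-- per edge outside that map's image by following the pointers (objective: faster).
-- Both ports' while-loops carry a fuel bounding the walk length: A's kmers.length + 1
-- chars are emitted at most (each continued step consumes a distinct edge), B's loop
-- body runs at most kmers.length times for the same reason.

-- ===== PORT A =====
def pvPrefix (s : String) : String :=
  String.ofList (PySem.List.slice s.toList (some 0) (some (-1)))   -- string[0:-1]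

def pvSuffix (s : String) : String :=
  String.ofList (PySem.List.slice s.toList (some 1) none)          -- string[1:]

def suffix_composition (k : Int) (text : String) (uniq : Bool) : List String :=
  let kmers := (PySem.List.pyRange 0 (PySem.Str.len text + 1 - k) 1).foldl
      (fun acc i => acc ++ [String.ofList (PySem.List.slice text.toList (some i) (some (i + k - 1)))]) []
  if uniq then PySem.List.sorted kmers (fun x => x)
  else PySem.List.sorted kmers (fun x => x)

def debrujin_graph_from_kmers (patterns : List String) : PySem.Dict String (List String) :=
  let kmers := patterns.foldl (fun acc pattern => acc ++ suffix_composition (PySem.Str.len pattern) pattern true) []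
  let kmersSet := PySem.Set.ofList kmers
  let d := kmersSet.foldl (fun d kmer1 => d.insert kmer1 ([] : List String)) PySem.Dict.empty
  patterns.foldl (fun d kmer => d.modify (pvPrefix kmer) [] (fun l => l ++ [pvSuffix kmer])) d

def graph_degrees (graph : PySem.Dict String (List String)) : PySem.Dict String (Int × Int) :=
  graph.keys.foldl (fun degrees i =>
    let neighbors := graph.getD i []
    let out_degree : Int := PySem.List.len neighbors
    let degrees := if degrees.contains i then degrees.modify i (0, 0) (fun v => (v.1, out_degree))
                   else degrees.insert i (0, out_degree)
    neighbors.foldl (fun degrees j =>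
      if degrees.contains j then degrees.modify j (0, 0) (fun v => (v.1 + 1, v.2))
      else degrees.insert j (1, 0)) degrees) PySem.Dict.empty

-- the 'while True' loop of A; degrees[w] / graph[w][0] are present at every reached w, so getD's
-- defaults are never taken inside Pre_
def walkA (graph : PySem.Dict String (List String)) (degrees : PySem.Dict String (Int × Int)) :
    Nat → List Char → String → List Char
  | 0, contig, _ => contig
  | fuel + 1, contig, w =>
    let contig := contig ++ [PySem.List.pyGetD w.toList (-1) ' ']
    if degrees.getD w (0, 0) == ((1 : Int), (1 : Int)) then
      walkA graph degrees fuel contig (PySem.List.pyGetD (graph.getD w []) 0 "")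
    else contig

def generate_contigs_from_reads (kmers : List String) : List String :=
  let graph := debrujin_graph_from_kmers kmers
  let degrees := graph_degrees graph
  let contigs := graph.keys.foldl (fun contigs v =>
    if degrees.getD v (0, 0) == ((1 : Int), (1 : Int)) then contigs
    else (graph.getD v []).foldl (fun contigs u =>
      contigs ++ [String.ofList (walkA graph degrees (kmers.length + 1) v.toList u)]) contigs) []
  PySem.List.sorted contigs (fun x => x)

-- ===== PORT B =====
def bPre (k : String) : String := String.ofList (PySem.List.slice k.toList none (some (-1)))  -- k[:-1]
def bSuf (k : String) : String := String.ofList (PySem.List.slice k.toList (some 1) none)     -- k[1:]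

-- while e in nxt: e = nxt[e]; chars.append(sufs[e][-1])
def walkC (sufs : List String) (nxt : PySem.Dict Int Int) : Nat → Int → List Char
  | 0, _ => []
  | fuel + 1, e =>
    if nxt.contains e then
      let e' := nxt.getD e (-1)
      PySem.List.pyGetD (PySem.List.pyGetD sufs e' "").toList (-1) ' ' :: walkC sufs nxt fuel e'
    else []

def generate_contigs_from_reads_alt (kmers : List String) : List String :=
  let pres := kmers.map bPre
  let sufs := kmers.map bSuf
  -- outs.setdefault(pres[e], []).append(e); ins.setdefault(sufs[e], []).append(e)
  let st := (PySem.List.pyRange 0 (PySem.List.len kmers) 1).foldl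
      (fun st e =>
        ((st.1.modify (PySem.List.pyGetD pres e "") [] (fun l => l ++ [e])),
         (st.2.modify (PySem.List.pyGetD sufs e "") [] (fun l => l ++ [e]))))
      (PySem.Dict.empty, PySem.Dict.empty)
  let outs := st.1
  let ins := st.2
  -- for v, inc in ins.items(): if len(inc) == 1 == len(outs.get(v, ())): nxt[inc[0]] = outs[v][0]
  let nxt := ins.items.foldl (fun nxt vi =>
      if PySem.List.len vi.2 == 1 && PySem.List.len (outs.getD vi.1 []) == 1 then
        nxt.insert (PySem.List.pyGetD vi.2 0 (-1)) (PySem.List.pyGetD (outs.getD vi.1 []) 0 (-1))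
      else nxt) PySem.Dict.empty
  let glued := PySem.Set.ofList nxt.values
  let contigs := (PySem.List.pyRange 0 (PySem.List.len kmers) 1).foldl
      (fun contigs e =>
        if PySem.Set.contains glued e then contigs
        else contigs ++ [String.ofList ((PySem.List.pyGetD pres e "").toList ++
          PySem.List.pyGetD (PySem.List.pyGetD sufs e "").toList (-1) ' ' ::
            walkC sufs nxt kmers.length e)])
      []
  PySem.List.sorted contigs (fun x => x)

-- ===== PRECONDITION & SPEC =====
-- A raises IndexError exactly when two or more kmers have length ≤ 1: the empty-string node ''
-- then has in-degree = out-degree ≥ 2, is picked as a contig start, and ''[-1] is evaluated.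
-- (With at most one such kmer, '' is a 1-in/1-out self-loop that every walk skips, and A returns.)
def Pre_generate_contigs_from_reads (kmers : List String) : Prop :=
  (kmers.filter (fun s => s.toList.length ≤ 1)).length ≤ 1
instance (kmers : List String) : Decidable (Pre_generate_contigs_from_reads kmers) := by
  unfold Pre_generate_contigs_from_reads; infer_instance

def pvWitness_generate_contigs_from_reads : List String := ["ab", "bc", "ca", "cd"]

def Spec_generate_contigs_from_reads (kmers : List String) (out : List String) : Prop :=
  out = generate_contigs_from_reads_alt kmers
instance (kmers : List String) (out : List String) : Decidable (Spec_generate_contigs_from_reads kmers out) := by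
  unfold Spec_generate_contigs_from_reads; infer_instance

-- ===== CLAIM (what is proved, stated in full; the proofs are below) =====
def Claim_equal_generate_contigs_from_reads : Prop :=
  ∀ (kmers : List String), Dom_generate_contigs_from_reads kmers →
    Pre_generate_contigs_from_reads kmers →
    Spec_generate_contigs_from_reads kmers (generate_contigs_from_reads kmers)

-- ===== LEMMAS AND PROOFS =====

-- normal forms of the slices both programs take
def pvPn (k : String) : String := String.ofList k.toList.dropLast
def pvSn (k : String) : String := String.ofList k.toList.tail

lemma pvPrefix_eq (k : String) : pvPrefix k = pvPn k := by
  simp [pvPrefix, pvPn, PySem.List.slice_zero_start, PySem.List.slice_to_neg_one]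

lemma pvSuffix_eq (k : String) : pvSuffix k = pvSn k := by
  simp [pvSuffix, pvSn, PySem.List.slice_from_one]

lemma bPre_eq : bPre = pvPn := by
  funext k; simp [bPre, pvPn, PySem.List.slice_to_neg_one]

lemma bSuf_eq : bSuf = pvSn := by
  funext k; simp [bSuf, pvSn, PySem.List.slice_from_one]

lemma bPre_apply (k : String) : bPre k = pvPn k := congrFun bPre_eq k

lemma bSuf_apply (k : String) : bSuf k = pvSn k := congrFun bSuf_eq k

-- the suffixes of kmers whose prefix is c, in input order (= every adjacency list of A)
def pvSUF (kmers : List String) (c : String) : List String :=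
  (kmers.filter (fun k => pvPn k == c)).map pvSn

-- the distinct prefixes in first-occurrence order (= the key list of A's graph)
def pvK (kmers : List String) : List String := PySem.Set.ofList (kmers.map pvPn)

-- A's common graph, written out as an association list
def pvCanon (kmers : List String) : PySem.Dict String (List String) :=
  PySem.Dict.mk ((pvK kmers).map (fun p => (p, pvSUF kmers p)))

lemma set_foldl_add {α : Type} [BEq α] [LawfulBEq α] :
    ∀ (l s : List α), (s ++ l).Nodup → l.foldl PySem.Set.add s = s ++ l := by
  intro l
  induction l with
  | nil => intro s _; simp
  | cons x t ih =>
    intro s h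
    have hx : x ∉ s := by
      have := List.disjoint_of_nodup_append h
      intro hm; exact (List.disjoint_left.mp this hm) (by simp)
    have h' : ((s ++ [x]) ++ t).Nodup := by simpa using h
    simp only [List.foldl_cons, PySem.Set.add_of_not_mem hx]
    rw [ih (s ++ [x]) h']
    simp

lemma ofList_of_nodup {α : Type} [BEq α] [LawfulBEq α] (l : List α) (h : l.Nodup) :
    PySem.Set.ofList l = l := by
  rw [PySem.Set.ofList_eq_foldl]
  simpa using set_foldl_add l [] (by simpa using h)

lemma update_of_subset {α : Type} [BEq α] [LawfulBEq α] :
    ∀ (l s : List α), (∀ x ∈ l, x ∈ s) → PySem.Set.update s l = s := by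
  intro l
  induction l with
  | nil => intro s _; rfl
  | cons x t ih =>
    intro s h
    have : PySem.Set.update s (x :: t) = PySem.Set.update (PySem.Set.add s x) t := rfl
    rw [this, PySem.Set.add_of_mem (h x (by simp))]
    exact ih s (fun y hy => h y (by simp [hy]))

-- A's per-pattern node list is just [prefix pattern]
lemma suffix_comp_eq (p : String) :
    suffix_composition (PySem.Str.len p) p true = [pvPn p] := by
  unfold suffix_composition
  have h1 : PySem.Str.len p + 1 - PySem.Str.len p = 0 + 1 := by ring
  rw [h1, PySem.List.pyRange_one_singleton]
  simp only [List.foldl_cons, List.foldl_nil, List.nil_append, if_true]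
  have h2 : PySem.List.slice p.toList (some 0) (some (0 + PySem.Str.len p - 1)) = p.toList.dropLast := by
    rw [PySem.Str.len_eq]
    rcases Nat.eq_zero_or_pos p.toList.length with h | h
    · have : (0 + (p.toList.length : Int) - 1) = -1 := by rw [h]; ring
      rw [this, PySem.List.slice_zero_start, PySem.List.slice_to_neg_one]
    · have : (0 + (p.toList.length : Int) - 1) = ((p.toList.length - 1 : Nat) : Int) := by
        push_cast [h]; ring
      rw [this, PySem.List.slice_zero_start, PySem.List.slice_to_natCast, List.dropLast_eq_take]
  rw [h2]
  rw [PySem.List.sorted_eq_self_of_pairwise _ _ (by simp)]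
  rfl

lemma kmersList_eq (kmers : List String) :
    kmers.foldl (fun acc pattern => acc ++ suffix_composition (PySem.Str.len pattern) pattern true) [] =
      kmers.map pvPn := by
  have : (fun (acc : List String) pattern => acc ++ suffix_composition (PySem.Str.len pattern) pattern true)
      = fun acc pattern => acc ++ [pvPn pattern] := by
    funext acc pattern; rw [suffix_comp_eq]
  rw [this, PySem.List.foldl_append_singleton_eq_map]
  simp

-- the initial all-[] dict looks up to []
lemma getD_foldl_insert_nil :
    ∀ (l : List String) (d : PySem.Dict String (List String)) (c : String),
      d.getD c [] = [] → (l.foldl (fun d k => d.insert k ([] : List String)) d).getD c [] = [] := by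
  intro l
  induction l with
  | nil => intro d c h; simpa using h
  | cons x t ih =>
    intro d c h
    simp only [List.foldl_cons]
    exact ih _ c (by rw [PySem.Dict.getD_insert]; split <;> simp [h])

lemma keys_foldl_insert_nil (l : List String) :
    ((l.foldl (fun d k => d.insert k ([] : List String)) PySem.Dict.empty)).keys =
      PySem.Set.update [] l := by
  have := PySem.Dict.keys_foldl_insert l (fun _ _ => ([] : List String)) PySem.Dict.empty
  simpa using this

-- ===== A's graph is pvCanon =====
lemma canon_keys (kmers : List String) : (pvCanon kmers).keys = pvK kmers := by
  simp [pvCanon, PySem.Dict.keys, Function.comp_def]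

lemma canon_nodup (kmers : List String) : (pvCanon kmers).keys.Nodup := by
  rw [canon_keys]; exact PySem.Set.nodup_ofList _

lemma canon_getD (kmers : List String) (c : String) :
    (pvCanon kmers).getD c [] = pvSUF kmers c := by
  by_cases hc : c ∈ pvK kmers
  · have hmem : (c, pvSUF kmers c) ∈ (pvCanon kmers).items := by
      have h : (pvCanon kmers).items = (pvK kmers).map (fun p => (p, pvSUF kmers p)) := rfl
      rw [h]
      exact List.mem_map_of_mem hc
    exact PySem.Dict.getD_of_mem_items _ hmem (canon_nodup kmers) []
  · have h1 : (pvCanon kmers).contains c = false := by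
      rw [← Bool.not_eq_true, PySem.Dict.contains_iff_mem_keys, canon_keys]
      exact hc
    have h2 : pvSUF kmers c = [] := by
      rw [pvSUF, List.filter_eq_nil_iff.mpr, List.map_nil]
      intro k hk
      simp only [beq_iff_eq]
      intro hpk
      exact hc (by rw [pvK, PySem.Set.mem_ofList, ← hpk]; exact List.mem_map_of_mem hk)
    rw [PySem.Dict.getD_of_not_contains _ _ h1, h2]

lemma graphA_eq_canon (kmers : List String) :
    debrujin_graph_from_kmers kmers = pvCanon kmers := by
  unfold debrujin_graph_from_kmers
  rw [kmersList_eq]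
  set d0 := (PySem.Set.ofList (kmers.map pvPn)).foldl
      (fun d kmer1 => d.insert kmer1 ([] : List String)) PySem.Dict.empty with hd0
  have hkeys0 : d0.keys = pvK kmers := by
    rw [hd0, keys_foldl_insert_nil]
    have : PySem.Set.update ([] : List String) (PySem.Set.ofList (kmers.map pvPn))
        = PySem.Set.ofList (PySem.Set.ofList (kmers.map pvPn)) := by
      rw [PySem.Set.ofList_eq_foldl]; rfl
    rw [this, ofList_of_nodup _ (PySem.Set.nodup_ofList _), pvK]
  have hgetD0 : ∀ c, d0.getD c [] = [] := fun c =>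
    getD_foldl_insert_nil _ _ c (PySem.Dict.getD_empty c [])
  set g := kmers.foldl (fun d kmer => d.modify (pvPrefix kmer) [] (fun l => l ++ [pvSuffix kmer])) d0 with hg
  have hgetD : ∀ c, g.getD c [] = pvSUF kmers c := by
    intro c
    have hb : g = (kmers.map (fun k => (pvPrefix k, pvSuffix k))).foldl
        (fun d p => d.modify p.1 [] (fun x => x ++ [p.2])) d0 := by
      rw [hg, List.foldl_map]
    rw [hb, PySem.Dict.getD_foldl_modify_append, hgetD0, List.nil_append, List.filter_map]
    rw [List.map_map, pvSUF]
    have hfilter : ((fun (p : String × String) => p.1 == c) ∘ fun k => (pvPrefix k, pvSuffix k))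
        = fun k => pvPn k == c := by
      funext k; simp [pvPrefix_eq]
    rw [hfilter]
    apply List.map_congr_left
    intro k _
    simp [pvSuffix_eq]
  have hkeys : g.keys = pvK kmers := by
    have : g.keys = PySem.Set.update d0.keys (kmers.map pvPrefix) := by
      rw [hg]
      exact PySem.Dict.keys_foldl_modify_key kmers pvPrefix []
        (fun _ kmer => fun l => l ++ [pvSuffix kmer]) d0
    rw [this, hkeys0]
    apply update_of_subset
    intro x hx
    rcases List.mem_map.mp hx with ⟨k, hk, rfl⟩
    rw [pvPrefix_eq, pvK, PySem.Set.mem_ofList]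
    exact List.mem_map_of_mem hk
  have hnodup : g.keys.Nodup := by rw [hkeys]; exact PySem.Set.nodup_ofList _
  apply PySem.Dict.ext
  rw [PySem.Dict.items_eq_map_keys g hnodup [], hkeys]
  have : (pvCanon kmers).items = (pvK kmers).map (fun p => (p, pvSUF kmers p)) := rfl
  rw [this]
  apply List.map_congr_left
  intro p _
  rw [hgetD p]

-- ===== the degree table of A, pointwise =====
def incStep (degs : PySem.Dict String (Int × Int)) (j : String) : PySem.Dict String (Int × Int) :=
  if degs.contains j then degs.modify j (0, 0) (fun v => (v.1 + 1, v.2))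
  else degs.insert j (1, 0)

def outStep (g : PySem.Dict String (List String)) (degs : PySem.Dict String (Int × Int))
    (i : String) : PySem.Dict String (Int × Int) :=
  if degs.contains i then degs.modify i (0, 0) (fun v => (v.1, PySem.List.len (g.getD i [])))
  else degs.insert i (0, PySem.List.len (g.getD i []))

lemma graph_degrees_eq (g : PySem.Dict String (List String)) :
    graph_degrees g = g.keys.foldl
      (fun degs i => (g.getD i []).foldl incStep (outStep g degs i)) PySem.Dict.empty := rfl

lemma getD_incStep (d : PySem.Dict String (Int × Int)) (j x : String) :
    (incStep d j).getD x (0, 0) =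
      if x = j then ((d.getD j (0, 0)).1 + 1, (d.getD j (0, 0)).2) else d.getD x (0, 0) := by
  unfold incStep
  by_cases hc : d.contains j
  · rw [if_pos hc, PySem.Dict.getD_modify]
  · rw [if_neg (by simpa using hc), PySem.Dict.getD_insert]
    by_cases hx : x = j
    · rw [if_pos hx, if_pos hx,
        PySem.Dict.getD_of_not_contains d _ (by simpa using hc)]
      norm_num
    · rw [if_neg hx, if_neg hx]

lemma getD_outStep (g : PySem.Dict String (List String)) (d : PySem.Dict String (Int × Int))
    (i x : String) :
    (outStep g d i).getD x (0, 0) =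
      ((d.getD x (0, 0)).1,
        if x = i then PySem.List.len (g.getD i []) else (d.getD x (0, 0)).2) := by
  unfold outStep
  by_cases hc : d.contains i
  · rw [if_pos hc, PySem.Dict.getD_modify]
    by_cases hx : x = i
    · subst hx; rw [if_pos rfl, if_pos rfl]
    · rw [if_neg hx, if_neg hx]
  · rw [if_neg (by simpa using hc), PySem.Dict.getD_insert]
    by_cases hx : x = i
    · subst hx
      rw [if_pos rfl, if_pos rfl,
        PySem.Dict.getD_of_not_contains d _ (by simpa using hc)]
    · rw [if_neg hx, if_neg hx]

lemma getD_incFold :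
    ∀ (l : List String) (d : PySem.Dict String (Int × Int)) (x : String),
      (l.foldl incStep d).getD x (0, 0) =
        ((d.getD x (0, 0)).1 + (l.count x : Int), (d.getD x (0, 0)).2) := by
  intro l
  induction l with
  | nil => intro d x; simp
  | cons j t ih =>
    intro d x
    simp only [List.foldl_cons]
    rw [ih, getD_incStep]
    by_cases hx : x = j
    · subst hx
      simp only [List.count_cons, beq_self_eq_true, if_true]
      simp only [Prod.mk.injEq]
      push_cast
      exact ⟨by ring, trivial⟩
    · rw [if_neg hx]
      have hne : ¬(j = x) := fun h => hx h.symm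
      have hcount : (j :: t).count x = t.count x := by
        simp [hne]
      rw [hcount]

lemma getD_degFold (g : PySem.Dict String (List String)) :
    ∀ (ks : List String) (d : PySem.Dict String (Int × Int)) (x : String), ks.Nodup →
      ((ks.foldl (fun degs i => (g.getD i []).foldl incStep (outStep g degs i)) d).getD x (0, 0)) =
        ((d.getD x (0, 0)).1 + ((ks.map (fun i => ((g.getD i []).count x : Int))).sum),
          if x ∈ ks then PySem.List.len (g.getD x []) else (d.getD x (0, 0)).2) := by
  intro ks
  induction ks with
  | nil => intro d x _; simp
  | cons i t ih =>
    intro d x hnd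
    simp only [List.foldl_cons]
    rw [ih _ _ (List.nodup_cons.mp hnd).2, getD_incFold, getD_outStep]
    simp only [List.map_cons, List.sum_cons, List.mem_cons]
    by_cases hx : x = i
    · subst hx
      have hxt : x ∉ t := (List.nodup_cons.mp hnd).1
      simp [hxt, add_assoc]
    · simp [hx, add_assoc]

lemma degrees_getD (g : PySem.Dict String (List String)) (h : g.keys.Nodup) (x : String) :
    (graph_degrees g).getD x (0, 0) =
      ((g.keys.map (fun i => ((g.getD i []).count x : Int))).sum,
        if x ∈ g.keys then PySem.List.len (g.getD x []) else 0) := by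
  rw [graph_degrees_eq, getD_degFold g g.keys PySem.Dict.empty x h]
  simp

lemma sum_ite_single {α : Type} [DecidableEq α] :
    ∀ (ks : List α) (q : α) (c : Int), ks.Nodup → q ∈ ks →
      (ks.map (fun p => if q = p then c else 0)).sum = c := by
  intro ks
  induction ks with
  | nil => intro q c _ hq; simp at hq
  | cons p t ih =>
    intro q c hnd hq
    simp only [List.map_cons, List.sum_cons]
    by_cases hqp : q = p
    · subst hqp
      have hqt : q ∉ t := (List.nodup_cons.mp hnd).1
      have : (t.map (fun p => if q = p then c else 0)).sum = 0 := by
        apply List.sum_eq_zero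
        intro y hy
        rcases List.mem_map.mp hy with ⟨p', hp', rfl⟩
        have hne : ¬(q = p') := by
          intro h
          exact hqt (by rw [h]; exact hp')
        rw [if_neg hne]
      simp [this]
    · rw [if_neg hqp, ih q c (List.nodup_cons.mp hnd).2
        ((List.mem_cons.mp hq).resolve_left hqp), zero_add]

lemma pvSUF_of_not_mem (kmers : List String) (c : String) (hc : c ∉ pvK kmers) :
    pvSUF kmers c = [] := by
  rw [pvSUF, List.filter_eq_nil_iff.mpr, List.map_nil]
  intro k hk
  simp only [beq_iff_eq]
  intro hpk
  exact hc (by rw [pvK, PySem.Set.mem_ofList, ← hpk]; exact List.mem_map_of_mem hk)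

lemma partition_count (x : String) :
    ∀ (l ks : List String), ks.Nodup → (∀ k ∈ l, pvPn k ∈ ks) →
      ((ks.map (fun p => ((pvSUF l p).count x : Int))).sum) = ((l.map pvSn).count x : Int) := by
  intro l
  induction l with
  | nil =>
    intro ks _ _
    have : ∀ p, pvSUF ([] : List String) p = [] := fun p => rfl
    simp [this]
  | cons k t ih =>
    intro ks hnd hmem
    have hstep : (fun p => ((pvSUF (k :: t) p).count x : Int))
        = fun p => ((if pvPn k = p then (if x = pvSn k then (1 : Int) else 0) else 0)
            + ((pvSUF t p).count x : Int)) := by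
      funext p
      by_cases hp : pvPn k = p
      · rw [if_pos hp]
        have hflt : pvSUF (k :: t) p = pvSn k :: pvSUF t p := by
          rw [pvSUF, List.filter_cons, if_pos (by simp [hp])]; rfl
        rw [hflt, List.count_cons]
        by_cases hx : x = pvSn k
        · rw [if_pos hx, if_pos (by simp [hx])]; push_cast; ring
        · rw [if_neg hx, if_neg (by simp; exact fun h => hx h.symm)]; push_cast; ring
      · rw [if_neg hp]
        have hflt : pvSUF (k :: t) p = pvSUF t p := by
          rw [pvSUF, List.filter_cons, if_neg (by simpa using hp)]; rfl
        rw [hflt]; ring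
    rw [hstep, PySem.List.sum_map_add_int,
      sum_ite_single ks (pvPn k) _ hnd (hmem k (by simp)),
      ih ks hnd (fun k' hk' => hmem k' (by simp [hk']))]
    simp only [List.map_cons, List.count_cons]
    by_cases hx : x = pvSn k
    · rw [if_pos hx, if_pos (by simp [hx])]; push_cast; ring
    · rw [if_neg hx, if_neg (by simp; exact fun h => hx h.symm)]; push_cast; ring

-- ===== B-side: index lists per node =====

-- the indices e with f(kmers[e]) = v, in input order
def pvIdx (f : String → String) (kmers : List String) (v : String) : List Int :=
  ((PySem.List.enumerate kmers 0).filter (fun p => f p.2 == v)).map (fun p => p.1)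

def bIn (kmers : List String) (v : String) : List Int := pvIdx pvSn kmers v
def bOut (kmers : List String) (v : String) : List Int := pvIdx pvPn kmers v

def pvKS (kmers : List String) : List String := PySem.Set.ofList (kmers.map pvSn)

-- the 1-in/1-out test, shared by both ports after rewriting
def pvC (kmers : List String) (w : String) : Bool :=
  ((bIn kmers w).length == 1) && ((bOut kmers w).length == 1)

def keyv (kmers : List String) (v : String) : Int := PySem.List.pyGetD (bIn kmers v) 0 (-1)
def valv (kmers : List String) (v : String) : Int := PySem.List.pyGetD (bOut kmers v) 0 (-1)

def vsC (kmers : List String) : List String := (pvKS kmers).filter (fun v => pvC kmers v)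

-- B's two dict-building folds and the successor-map fold, named
def outsFold (kmers : List String) : PySem.Dict String (List Int) :=
  (PySem.List.pyRange 0 (PySem.List.len kmers) 1).foldl
    (fun d e => d.modify (PySem.List.pyGetD (kmers.map bPre) e "") [] (fun l => l ++ [e]))
    PySem.Dict.empty

def insFold (kmers : List String) : PySem.Dict String (List Int) :=
  (PySem.List.pyRange 0 (PySem.List.len kmers) 1).foldl
    (fun d e => d.modify (PySem.List.pyGetD (kmers.map bSuf) e "") [] (fun l => l ++ [e]))
    PySem.Dict.empty

def nxtFold (kmers : List String) : PySem.Dict Int Int :=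
  (insFold kmers).items.foldl (fun nxt vi =>
      if PySem.List.len vi.2 == 1 && PySem.List.len ((outsFold kmers).getD vi.1 []) == 1 then
        nxt.insert (PySem.List.pyGetD vi.2 0 (-1)) (PySem.List.pyGetD ((outsFold kmers).getD vi.1 []) 0 (-1))
      else nxt) PySem.Dict.empty

lemma alt_eq (kmers : List String) : generate_contigs_from_reads_alt kmers =
    PySem.List.sorted
      ((PySem.List.pyRange 0 (PySem.List.len kmers) 1).foldl
        (fun contigs e =>
          if PySem.Set.contains (PySem.Set.ofList (nxtFold kmers).values) e then contigs
          else contigs ++ [String.ofList ((PySem.List.pyGetD (kmers.map bPre) e "").toList ++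
            PySem.List.pyGetD (PySem.List.pyGetD (kmers.map bSuf) e "").toList (-1) ' ' ::
              walkC (kmers.map bSuf) (nxtFold kmers) kmers.length e)]) [])
      (fun x => x) := by
  simp only [generate_contigs_from_reads_alt, outsFold, insFold, nxtFold]
  rw [PySem.List.foldl_prod_mk
    (fun (d : PySem.Dict String (List Int)) e =>
      d.modify (PySem.List.pyGetD (kmers.map bPre) e "") [] (fun l => l ++ [e]))
    (fun (d : PySem.Dict String (List Int)) e =>
      d.modify (PySem.List.pyGetD (kmers.map bSuf) e "") [] (fun l => l ++ [e]))
    (PySem.List.pyRange 0 (PySem.List.len kmers) 1) PySem.Dict.empty PySem.Dict.empty]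

lemma getAt (f : String → String) (kmers : List String) (j : Nat) (hj : j < kmers.length) :
    PySem.List.pyGetD (kmers.map f) (j : Int) "" = f (kmers.getD j "") := by
  rw [PySem.List.pyGetD_natCast,
    List.getD_eq_getElem _ _ (by simpa using hj), List.getElem_map,
    List.getD_eq_getElem _ _ hj]

lemma build_getD (f : String → String) (kmers : List String) (v : String) :
    ((PySem.List.pyRange 0 (PySem.List.len kmers) 1).foldl
      (fun d e => d.modify (PySem.List.pyGetD (kmers.map f) e "") [] (fun l => l ++ [e]))
      PySem.Dict.empty).getD v [] = pvIdx f kmers v := by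
  rw [PySem.List.foldl_congr_mem _ _
      (fun (d : PySem.Dict String (List Int)) e =>
        d.modify (f (PySem.List.pyGetD kmers e "")) [] (fun l => l ++ [e])) _
      (by
        intro acc e he
        rcases PySem.List.mem_pyRange_one.mp he with ⟨h0, hlt⟩
        obtain ⟨j, rfl⟩ : ∃ j : Nat, e = (j : Int) := ⟨e.toNat, by omega⟩
        have hj : j < kmers.length := by
          rw [PySem.List.len_eq] at hlt; exact_mod_cast hlt
        show acc.modify (PySem.List.pyGetD (kmers.map f) (j : Int) "") [] (fun l => l ++ [(j : Int)])
          = acc.modify (f (PySem.List.pyGetD kmers (j : Int) "")) [] (fun l => l ++ [(j : Int)])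
        rw [getAt f kmers j hj, PySem.List.pyGetD_natCast])]
  have hen := PySem.List.enumerate_eq_map_pyRange kmers ""
  rw [show (PySem.List.pyRange 0 (PySem.List.len kmers) 1).foldl
        (fun (d : PySem.Dict String (List Int)) e =>
          d.modify (f (PySem.List.pyGetD kmers e "")) [] (fun l => l ++ [e])) PySem.Dict.empty
      = (PySem.List.enumerate kmers 0).foldl
        (fun (d : PySem.Dict String (List Int)) p =>
          d.modify (f p.2) [] (fun l => l ++ [p.1])) PySem.Dict.empty from by
    rw [hen, List.foldl_map]]
  rw [show ((PySem.List.enumerate kmers 0).foldl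
        (fun (d : PySem.Dict String (List Int)) p =>
          d.modify (f p.2) [] (fun l => l ++ [p.1])) PySem.Dict.empty)
      = (((PySem.List.enumerate kmers 0).map (fun p => (f p.2, p.1))).foldl
        (fun (d : PySem.Dict String (List Int)) q =>
          d.modify q.1 [] (fun l => l ++ [q.2])) PySem.Dict.empty) from by
    rw [List.foldl_map]]
  rw [PySem.Dict.getD_foldl_modify_append, PySem.Dict.getD_empty, List.nil_append,
    List.filter_map, List.map_map, pvIdx]
  rfl

lemma build_keys (f : String → String) (kmers : List String) :
    ((PySem.List.pyRange 0 (PySem.List.len kmers) 1).foldl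
      (fun d e => d.modify (PySem.List.pyGetD (kmers.map f) e "") [] (fun l => l ++ [e]))
      PySem.Dict.empty).keys = PySem.Set.ofList (kmers.map f) := by
  rw [PySem.Dict.keys_foldl_modify_key _ (fun e => PySem.List.pyGetD (kmers.map f) e "") []
      (fun _ e => fun l => l ++ [e]) PySem.Dict.empty]
  have h := PySem.List.map_pyGetD_pyRange_zero' (kmers.map f) ""
  rw [List.length_map] at h
  rw [PySem.Dict.keys_empty, PySem.List.len_eq, h, PySem.Set.update_nil_left]

lemma outs_getD (kmers : List String) (v : String) :
    (outsFold kmers).getD v [] = bOut kmers v := by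
  rw [outsFold, build_getD, bOut, bPre_eq]

lemma ins_getD (kmers : List String) (v : String) :
    (insFold kmers).getD v [] = bIn kmers v := by
  rw [insFold, build_getD, bIn, bSuf_eq]

lemma ins_keys (kmers : List String) : (insFold kmers).keys = pvKS kmers := by
  rw [insFold, build_keys, bSuf_eq, pvKS]

lemma ins_items (kmers : List String) :
    (insFold kmers).items = (pvKS kmers).map (fun v => (v, bIn kmers v)) := by
  have hnd : (insFold kmers).keys.Nodup := by
    rw [ins_keys]; exact PySem.Set.nodup_ofList _
  rw [PySem.Dict.items_eq_map_keys _ hnd [], ins_keys]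
  apply List.map_congr_left
  intro v _
  rw [ins_getD]

-- small facts about the index lists
lemma enum_filter_map_snd {α : Type} (xs : List α) (q : α → Bool) :
    ∀ (s : Int), (((PySem.List.enumerate xs s).filter (fun p => q p.2)).map (fun p => p.2)) = xs.filter q := by
  induction xs with
  | nil => intro s; rfl
  | cons x t ih =>
    intro s
    rw [PySem.List.enumerate_cons, List.filter_cons]
    by_cases h : q x
    · rw [if_pos (by simpa using h), List.filter_cons, if_pos h, List.map_cons, ih]
    · rw [if_neg (by simpa using h), List.filter_cons, if_neg (by simpa using h), ih]

lemma mem_pvIdx (f : String → String) (kmers : List String) (v : String) (e : Int)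
    (h : e ∈ pvIdx f kmers v) :
    ∃ j : Nat, j < kmers.length ∧ e = (j : Int) ∧ f (kmers.getD j "") = v := by
  unfold pvIdx at h
  obtain ⟨p, hp, rfl⟩ := List.mem_map.mp h
  obtain ⟨hpe, hq⟩ := List.mem_filter.mp hp
  obtain ⟨k, hk, rfl⟩ := (PySem.List.mem_enumerate_iff _ _ _).mp hpe
  refine ⟨k, hk, by simp, ?_⟩
  rw [List.getD_eq_getElem _ _ hk]
  simpa [beq_iff_eq] using hq

lemma mem_pvIdx_self (f : String → String) (kmers : List String) (j : Nat) (hj : j < kmers.length) :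
    (j : Int) ∈ pvIdx f kmers (f (kmers.getD j "")) := by
  unfold pvIdx
  apply List.mem_map.mpr
  refine ⟨((j : Int), kmers.getD j ""), List.mem_filter.mpr ⟨?_, by simp⟩, rfl⟩
  exact (PySem.List.mem_enumerate_iff _ _ _).mpr
    ⟨j, hj, by rw [List.getD_eq_getElem _ _ hj]; simp⟩

lemma sing_of_len_one (l : List Int) (h : l.length = 1) :
    l = [PySem.List.pyGetD l 0 (-1)] := by
  obtain ⟨a, rfl⟩ := List.length_eq_one_iff.mp h
  rw [PySem.List.pyGetD_zero_cons]

lemma bIn_eq_of_C (kmers : List String) (w : String) (h : pvC kmers w = true) :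
    bIn kmers w = [keyv kmers w] := by
  have hl : (bIn kmers w).length = 1 := by
    have := (Bool.and_eq_true _ _).mp h
    exact beq_iff_eq.mp this.1
  exact sing_of_len_one _ hl

lemma bOut_eq_of_C (kmers : List String) (w : String) (h : pvC kmers w = true) :
    bOut kmers w = [valv kmers w] := by
  have hl : (bOut kmers w).length = 1 := by
    have := (Bool.and_eq_true _ _).mp h
    exact beq_iff_eq.mp this.2
  exact sing_of_len_one _ hl

lemma mem_pvKS_of_C (kmers : List String) (w : String) (h : pvC kmers w = true) :
    w ∈ pvKS kmers := by
  have hk : keyv kmers w ∈ bIn kmers w := by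
    rw [bIn_eq_of_C kmers w h]; simp
  obtain ⟨j, hj, _, hfv⟩ := mem_pvIdx pvSn kmers w _ hk
  rw [pvKS, PySem.Set.mem_ofList, ← hfv]
  exact List.mem_map_of_mem (by rw [List.getD_eq_getElem _ _ hj]; exact List.getElem_mem hj)

lemma mem_vsC_of_C (kmers : List String) (w : String) (h : pvC kmers w = true) :
    w ∈ vsC kmers :=
  List.mem_filter.mpr ⟨mem_pvKS_of_C kmers w h, h⟩

lemma keyv_map_nodup (kmers : List String) : ((vsC kmers).map (keyv kmers)).Nodup := by
  apply List.Nodup.map_on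
  · intro v hv v' hv' he
    have hCv := (List.mem_filter.mp hv).2
    have hCv' := (List.mem_filter.mp hv').2
    have h1 : keyv kmers v ∈ bIn kmers v := by rw [bIn_eq_of_C kmers v hCv]; simp
    have h2 : keyv kmers v' ∈ bIn kmers v' := by rw [bIn_eq_of_C kmers v' hCv']; simp
    obtain ⟨j, hj, hej, hfv⟩ := mem_pvIdx pvSn kmers v _ h1
    obtain ⟨j', hj', hej', hfv'⟩ := mem_pvIdx pvSn kmers v' _ h2
    have : j = j' := by
      have := hej ▸ hej' ▸ he
      exact_mod_cast this
    rw [← hfv, ← hfv', this]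
  · exact (PySem.Set.nodup_ofList _).filter _

lemma natBeq_int (n : Nat) : (((n : Int)) == (1 : Int)) = (n == 1) := by
  rw [Bool.eq_iff_iff]
  simp only [beq_iff_eq]
  exact ⟨fun h => by exact_mod_cast h, fun h => by exact_mod_cast h⟩

lemma nxt_items (kmers : List String) :
    (nxtFold kmers).items = (vsC kmers).map (fun v => (keyv kmers v, valv kmers v)) := by
  unfold nxtFold
  rw [ins_items, List.foldl_map]
  simp only [outs_getD, PySem.List.len_eq, natBeq_int]
  rw [show (fun (nxt : PySem.Dict Int Int) (v : String) =>
      if ((bIn kmers v).length == 1) && ((bOut kmers v).length == 1) then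
        nxt.insert (PySem.List.pyGetD (bIn kmers v) 0 (-1)) (PySem.List.pyGetD (bOut kmers v) 0 (-1))
      else nxt)
    = (fun (nxt : PySem.Dict Int Int) (v : String) =>
      if pvC kmers v then nxt.insert (keyv kmers v) (valv kmers v) else nxt) from rfl]
  rw [PySem.List.foldl_if_eq_foldl_filter (fun v => pvC kmers v)
      (fun (nxt : PySem.Dict Int Int) v => nxt.insert (keyv kmers v) (valv kmers v))]
  rw [show List.filter (fun v => pvC kmers v) (pvKS kmers) = vsC kmers from rfl]
  rw [PySem.Dict.items_foldl_insert_fresh (vsC kmers) (keyv kmers) (valv kmers) PySem.Dict.empty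
      (by intro a _; exact PySem.Dict.contains_empty _) (keyv_map_nodup kmers)]
  rfl

lemma nxt_keys (kmers : List String) :
    (nxtFold kmers).keys = (vsC kmers).map (keyv kmers) := by
  simp only [PySem.Dict.keys, nxt_items, List.map_map]
  rfl

lemma nxt_values (kmers : List String) :
    (nxtFold kmers).values = (vsC kmers).map (valv kmers) := by
  simp only [PySem.Dict.values, nxt_items, List.map_map]
  rfl

lemma nxt_keys_nodup (kmers : List String) : (nxtFold kmers).keys.Nodup := by
  rw [nxt_keys]; exact keyv_map_nodup kmers

lemma keyv_eq_self (kmers : List String) (j : Nat) (hj : j < kmers.length)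
    (hC : pvC kmers (pvSn (kmers.getD j "")) = true) :
    keyv kmers (pvSn (kmers.getD j "")) = (j : Int) := by
  have hm : (j : Int) ∈ bIn kmers (pvSn (kmers.getD j "")) := mem_pvIdx_self pvSn kmers j hj
  rw [bIn_eq_of_C _ _ hC] at hm
  exact (List.mem_singleton.mp hm).symm

lemma nxt_contains_iff (kmers : List String) (j : Nat) (hj : j < kmers.length) :
    (nxtFold kmers).contains (j : Int) = pvC kmers (pvSn (kmers.getD j "")) := by
  rw [Bool.eq_iff_iff, PySem.Dict.contains_iff_mem_keys, nxt_keys]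
  constructor
  · intro h
    obtain ⟨v, hv, he⟩ := List.mem_map.mp h
    have hC := (List.mem_filter.mp hv).2
    have hk : keyv kmers v ∈ bIn kmers v := by rw [bIn_eq_of_C kmers v hC]; simp
    obtain ⟨j', hj', hej, hfv⟩ := mem_pvIdx pvSn kmers v _ hk
    have hjj : j' = j := by
      have : ((j' : Int)) = (j : Int) := hej ▸ he
      exact_mod_cast this
    rw [← hjj, hfv]
    exact hC
  · intro h
    exact List.mem_map.mpr ⟨pvSn (kmers.getD j ""), mem_vsC_of_C kmers _ h,
      keyv_eq_self kmers j hj h⟩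

lemma nxt_getD (kmers : List String) (j : Nat) (hj : j < kmers.length)
    (hC : pvC kmers (pvSn (kmers.getD j "")) = true) :
    (nxtFold kmers).getD (j : Int) (-1) = valv kmers (pvSn (kmers.getD j "")) := by
  apply PySem.Dict.getD_of_mem_items
  · rw [nxt_items]
    exact List.mem_map.mpr ⟨pvSn (kmers.getD j ""), mem_vsC_of_C kmers _ hC,
      by rw [keyv_eq_self kmers j hj hC]⟩
  · exact nxt_keys_nodup kmers

lemma valv_eq_self (kmers : List String) (j : Nat) (hj : j < kmers.length)
    (hC : pvC kmers (pvPn (kmers.getD j "")) = true) :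
    valv kmers (pvPn (kmers.getD j "")) = (j : Int) := by
  have hm : (j : Int) ∈ bOut kmers (pvPn (kmers.getD j "")) := mem_pvIdx_self pvPn kmers j hj
  rw [bOut_eq_of_C _ _ hC] at hm
  exact (List.mem_singleton.mp hm).symm

lemma glued_iff (kmers : List String) (j : Nat) (hj : j < kmers.length) :
    ((PySem.Set.ofList (nxtFold kmers).values).contains (j : Int))
      = pvC kmers (pvPn (kmers.getD j "")) := by
  rw [Bool.eq_iff_iff, PySem.Set.contains_iff, PySem.Set.mem_ofList, nxt_values]
  constructor
  · intro h
    obtain ⟨v, hv, he⟩ := List.mem_map.mp h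
    have hC := (List.mem_filter.mp hv).2
    have hk : valv kmers v ∈ bOut kmers v := by rw [bOut_eq_of_C kmers v hC]; simp
    obtain ⟨j', hj', hej, hfv⟩ := mem_pvIdx pvPn kmers v _ hk
    have hjj : j' = j := by
      have : ((j' : Int)) = (j : Int) := hej ▸ he
      exact_mod_cast this
    rw [← hjj, hfv]
    exact hC
  · intro h
    exact List.mem_map.mpr ⟨pvPn (kmers.getD j ""), mem_vsC_of_C kmers _ h,
      valv_eq_self kmers j hj h⟩

-- suffixes read through B's index lists are A's adjacency lists
lemma bOut_map_suf (kmers : List String) (v : String) :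
    (bOut kmers v).map (fun e => PySem.List.pyGetD (kmers.map bSuf) e "") = pvSUF kmers v := by
  unfold bOut pvIdx
  rw [List.map_map]
  rw [List.map_congr_left (g := fun (p : Int × String) => pvSn p.2) (by
    intro p hp
    obtain ⟨k, hk, rfl⟩ := (PySem.List.mem_enumerate_iff _ _ _).mp (List.mem_filter.mp hp).1
    show PySem.List.pyGetD (kmers.map bSuf) (0 + (k : Int)) "" = pvSn kmers[k]
    rw [zero_add, getAt bSuf kmers k hk, bSuf_eq, List.getD_eq_getElem _ _ hk])]
  rw [show (fun (p : Int × String) => pvSn p.2) = pvSn ∘ (fun (p : Int × String) => p.2) from rfl]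
  rw [← List.map_map, enum_filter_map_snd kmers (fun k => pvPn k == v) 0, pvSUF]

-- ===== the branch tests agree =====
lemma len_bIn (kmers : List String) (v : String) :
    (bIn kmers v).length = (kmers.map pvSn).count v := by
  have h := congrArg List.length (enum_filter_map_snd kmers (fun k => pvSn k == v) 0)
  rw [List.length_map] at h
  rw [bIn, pvIdx, List.length_map, h, List.count, List.countP_map]
  rw [← List.countP_eq_length_filter]
  rfl

lemma len_bOut (kmers : List String) (v : String) :
    (bOut kmers v).length = (pvSUF kmers v).length := by
  have h := congrArg List.length (enum_filter_map_snd kmers (fun k => pvPn k == v) 0)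
  rw [List.length_map] at h
  rw [bOut, pvIdx, List.length_map, h, pvSUF, List.length_map]

lemma degA_pair (kmers : List String) (w : String) :
    (graph_degrees (pvCanon kmers)).getD w (0, 0) =
      (((kmers.map pvSn).count w : Int), ((pvSUF kmers w).length : Int)) := by
  rw [degrees_getD _ (canon_nodup kmers) w, canon_keys]
  have h1 : ((pvK kmers).map (fun i => (((pvCanon kmers).getD i []).count w : Int)))
      = (pvK kmers).map (fun i => ((pvSUF kmers i).count w : Int)) := by
    apply List.map_congr_left
    intro p _
    rw [canon_getD]
  rw [h1, partition_count w kmers (pvK kmers) (PySem.Set.nodup_ofList _)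
    (fun k hk => by rw [pvK, PySem.Set.mem_ofList]; exact List.mem_map_of_mem hk)]
  by_cases hw : w ∈ pvK kmers
  · rw [if_pos hw, canon_getD, PySem.List.len_eq]
  · rw [if_neg hw, pvSUF_of_not_mem kmers w hw]
    rfl

lemma degA_test (kmers : List String) (w : String) :
    ((graph_degrees (pvCanon kmers)).getD w (0, 0) == ((1 : Int), (1 : Int)))
      = pvC kmers w := by
  rw [degA_pair, Bool.eq_iff_iff]
  simp only [pvC, Bool.and_eq_true, beq_iff_eq, Prod.mk.injEq, len_bIn, len_bOut]
  omega

-- ===== the walks agree =====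
lemma walkA_succ (g : PySem.Dict String (List String)) (d : PySem.Dict String (Int × Int))
    (f : Nat) (acc : List Char) (w : String) :
    walkA g d (f + 1) acc w =
      if d.getD w (0, 0) == ((1 : Int), (1 : Int)) then
        walkA g d f (acc ++ [PySem.List.pyGetD w.toList (-1) ' '])
          (PySem.List.pyGetD (g.getD w []) 0 "")
      else acc ++ [PySem.List.pyGetD w.toList (-1) ' '] := rfl

lemma walkC_succ (sufs : List String) (nxt : PySem.Dict Int Int) (f : Nat) (e : Int) :
    walkC sufs nxt (f + 1) e =
      if nxt.contains e then
        PySem.List.pyGetD (PySem.List.pyGetD sufs (nxt.getD e (-1)) "").toList (-1) ' ' ::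
          walkC sufs nxt f (nxt.getD e (-1))
      else [] := rfl

lemma walk_eq (kmers : List String) :
    ∀ (f : Nat) (acc : List Char) (j : Nat), j < kmers.length →
      walkA (pvCanon kmers) (graph_degrees (pvCanon kmers)) (f + 1) acc (pvSn (kmers.getD j "")) =
      acc ++ PySem.List.pyGetD (pvSn (kmers.getD j "")).toList (-1) ' ' ::
        walkC (kmers.map bSuf) (nxtFold kmers) f (j : Int) := by
  intro f
  induction f with
  | zero =>
    intro acc j hj
    rw [walkA_succ]
    show _ = acc ++ [PySem.List.pyGetD (pvSn (kmers.getD j "")).toList (-1) ' ']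
    split
    · show walkA _ _ 0 _ _ = _
      rfl
    · rfl
  | succ n ih =>
    intro acc j hj
    rw [walkA_succ, walkC_succ, degA_test, nxt_contains_iff kmers j hj]
    by_cases h : pvC kmers (pvSn (kmers.getD j "")) = true
    · rw [if_pos h, if_pos h]
      set w := pvSn (kmers.getD j "") with hw
      have hsing := bOut_eq_of_C kmers w h
      have hmem : valv kmers w ∈ bOut kmers w := by rw [hsing]; simp
      obtain ⟨j', hj', hev, hpv⟩ := mem_pvIdx pvPn kmers w _ hmem
      have hsuf : pvSUF kmers w = [pvSn (kmers.getD j' "")] := by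
        have hb := bOut_map_suf kmers w
        rw [hsing, List.map_cons, List.map_nil, hev] at hb
        rw [← hb, getAt bSuf kmers j' hj', bSuf_eq]
      rw [canon_getD, hsuf, PySem.List.pyGetD_zero_cons,
        nxt_getD kmers j hj h, hev,
        getAt bSuf kmers j' hj', bSuf_apply,
        ih (acc ++ [PySem.List.pyGetD w.toList (-1) ' ']) j' hj']
      simp
    · rw [if_neg h, if_neg h]

-- ===== regrouping: A's per-node enumeration is a permutation of B's per-edge one =====
lemma sum_ite_mem (a : String) (c : Nat) :
    ∀ (K : List String), K.Nodup →
      ((K.map (fun v => if a == v then c else 0)).sum) = if a ∈ K then c else 0 := by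
  intro K
  induction K with
  | nil => intro _; simp
  | cons v t ih =>
    intro hnd
    obtain ⟨hvt, hnd'⟩ := List.nodup_cons.mp hnd
    simp only [List.map_cons, List.sum_cons, ih hnd']
    by_cases h : a = v
    · subst h
      have hat : a ∉ t := hvt
      simp [hat]
    · simp [h, List.mem_cons]

lemma group_perm (l : List String) :
    ((PySem.Set.ofList (l.map pvPn)).flatMap (fun v => l.filter (fun k => pvPn k == v))).Perm l := by
  rw [List.perm_iff_count]
  intro x
  rw [List.count_flatMap]
  rw [List.map_congr_left (g := fun v => if pvPn x == v then l.count x else 0) (by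
    intro v _
    simp only [Function.comp]
    by_cases h : pvPn x = v
    · rw [if_pos (by simpa using h), List.count_filter (by simpa using h)]
    · rw [if_neg (by simpa using h), List.count_eq_zero]
      intro hx
      exact h (by simpa [beq_iff_eq] using (List.mem_filter.mp hx).2))]
  rw [sum_ite_mem _ _ _ (PySem.Set.nodup_ofList _)]
  by_cases hm : pvPn x ∈ PySem.Set.ofList (l.map pvPn)
  · rw [if_pos hm]
  · rw [if_neg hm]
    symm
    rw [List.count_eq_zero]
    intro hx
    exact hm ((PySem.Set.mem_ofList _ _).mpr (List.mem_map_of_mem hx))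

-- ===== VERDICT (by name: the statement is the Claim_ definition above) =====
theorem generate_contigs_from_reads_spec : Claim_equal_generate_contigs_from_reads := by
  intro kmers _ _
  unfold Spec_generate_contigs_from_reads
  simp only [generate_contigs_from_reads]
  rw [graphA_eq_canon, alt_eq, canon_keys]
  set F : String → List String := fun k =>
    if pvC kmers (pvPn k) then []
    else [String.ofList (walkA (pvCanon kmers) (graph_degrees (pvCanon kmers))
      (kmers.length + 1) (pvPn k).toList (pvSn k))] with hF
  -- A's pre-sort list, as a flatMap over the distinct prefixes
  rw [PySem.List.foldl_congr_mem _ _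
      (fun (contigs : List String) v => contigs ++
        (if pvC kmers v then []
         else (pvSUF kmers v).map (fun u => String.ofList (walkA (pvCanon kmers)
           (graph_degrees (pvCanon kmers)) (kmers.length + 1) v.toList u)))) _
      (by
        intro acc v _
        beta_reduce
        rw [degA_test, canon_getD]
        by_cases h : pvC kmers v = true
        · rw [if_pos h, if_pos h, List.append_nil]
        · rw [if_neg h, if_neg h, PySem.List.foldl_append_singleton_eq_map])]
  rw [PySem.List.foldl_append_eq_flatMap, List.nil_append]
  -- B's pre-sort list, as a flatMap over the kmers
  rw [PySem.List.foldl_congr_mem _ _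
      (fun (contigs : List String) e => contigs ++ F (PySem.List.pyGetD kmers e "")) _
      (by
        intro acc e he
        rcases PySem.List.mem_pyRange_one.mp he with ⟨h0, hlt⟩
        rw [PySem.List.len_eq] at hlt
        obtain ⟨j, rfl⟩ : ∃ j : Nat, e = (j : Int) := ⟨e.toNat, by omega⟩
        have hj : j < kmers.length := by exact_mod_cast hlt
        beta_reduce
        rw [PySem.List.pyGetD_natCast kmers j "", glued_iff kmers j hj,
          getAt bPre kmers j hj, bPre_apply, getAt bSuf kmers j hj, bSuf_apply, hF]
        beta_reduce
        by_cases h : pvC kmers (pvPn (kmers.getD j "")) = true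
        · rw [if_pos h, if_pos h, List.append_nil]
        · rw [if_neg h, if_neg h,
            walk_eq kmers kmers.length (pvPn (kmers.getD j "")).toList j hj])]
  rw [show (fun (contigs : List String) (e : Int) => contigs ++ F (PySem.List.pyGetD kmers e ""))
      = (fun (contigs : List String) (e : Int) =>
          (fun (acc : List String) (k : String) => acc ++ F k) contigs (PySem.List.pyGetD kmers e "")) from rfl]
  rw [PySem.List.len_eq, PySem.List.foldl_pyRange_zero_pyGetD' kmers ""
      (fun (acc : List String) (k : String) => acc ++ F k) []]
  rw [PySem.List.foldl_append_eq_flatMap, List.nil_append]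
  -- both sides sorted: reduce to a permutation
  rw [PySem.List.sorted_id_eq_sorted_id_iff_perm]
  have hsplit : ∀ v ∈ pvK kmers,
      (if pvC kmers v then []
       else (pvSUF kmers v).map (fun u => String.ofList (walkA (pvCanon kmers)
         (graph_degrees (pvCanon kmers)) (kmers.length + 1) v.toList u)))
      = (kmers.filter (fun k => pvPn k == v)).flatMap F := by
    intro v _
    by_cases h : pvC kmers v = true
    · rw [if_pos h]
      symm
      rw [List.flatMap_congr (g := fun _ => ([] : List String)) (by
        intro k hk
        have hpk : pvPn k = v := by simpa [beq_iff_eq] using (List.mem_filter.mp hk).2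
        rw [hF]
        beta_reduce
        rw [hpk, if_pos h])]
      simp
    · rw [if_neg h]
      symm
      rw [List.flatMap_congr (g := fun k => [String.ofList (walkA (pvCanon kmers)
          (graph_degrees (pvCanon kmers)) (kmers.length + 1) v.toList (pvSn k))]) (by
        intro k hk
        have hpk : pvPn k = v := by simpa [beq_iff_eq] using (List.mem_filter.mp hk).2
        rw [hF]
        beta_reduce
        rw [hpk, if_neg h])]
      rw [← List.map_eq_flatMap, pvSUF, List.map_map]
      rfl
  rw [List.flatMap_congr hsplit]
  rw [← List.flatMap_assoc]
  exact List.Perm.flatMap_right F (group_perm kmers)
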